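-- pv_equiv track=rewrite | github.com/strogera/AoC2019 | Day6/day6.py | dfs
-- ===== SOURCE A (Python) =====
-- def dfs(graph, v):
--    stack=[]
--    discovered=set()
--    count=0
--    stack.append((v, count))
--    countall=0
--    while stack:
--        (v, count)=stack.pop()
--        countall+=count
--        if v not in discovered:
--            discovered.add(v)
--            if v in graph:
--                for w in graph[v]:
--                    stack.append((w, count+1))
--    return countall
-- ===== SOURCE B (Python) =====
-- def dfs(graph, v):
--     # Record each node's discovery depth once (same LIFO discovery order as a
--     # stack DFS), then aggregate: every expanded key u contributes
--     # len(graph[u]) pops at depth depth[u]+1, and the root pop contributes 0.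
--     depth = {}
--     stack = [(v, 0)]
--     while stack:
--         u, d = stack.pop()
--         if u not in depth:
--             depth[u] = d
--             for w in graph.get(u, ()):
--                 stack.append((w, d + 1))
--     return sum(len(graph[u]) * (d + 1) for u, d in depth.items() if u in graph)
-- ===== Notes on version B (the rewrite author's own statement) =====
-- stated objective: alternative
-- what changed: A accumulates the popped count of every stack entry (duplicates included) into a running total; B instead records each node's discovery depth once in a dict and computes the total afterwards in closed form as sum(len(graph[u])*(depth[u]+1)) over discovered keys, exploiting that every pushed entry is eventually popped.
import Mathlib
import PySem

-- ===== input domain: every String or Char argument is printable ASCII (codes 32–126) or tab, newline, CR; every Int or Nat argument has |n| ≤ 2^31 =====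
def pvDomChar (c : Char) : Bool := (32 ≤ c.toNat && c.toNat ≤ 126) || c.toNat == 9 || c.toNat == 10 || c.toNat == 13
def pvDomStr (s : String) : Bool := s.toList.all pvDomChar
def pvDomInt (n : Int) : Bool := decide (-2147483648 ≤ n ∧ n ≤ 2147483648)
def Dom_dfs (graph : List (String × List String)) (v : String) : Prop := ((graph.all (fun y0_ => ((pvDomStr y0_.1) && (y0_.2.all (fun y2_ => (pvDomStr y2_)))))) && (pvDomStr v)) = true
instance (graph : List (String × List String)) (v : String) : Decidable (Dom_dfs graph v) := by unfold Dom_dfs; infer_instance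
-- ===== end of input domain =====

-- B replaces A's per-pop accumulation (which also adds the counts of re-popped,
-- already-discovered nodes) by a discovery-depth dict plus a closed-form
-- aggregation sum(len(graph[u])*(depth[u]+1)); same algorithmic cost ("alternative").

-- ===== PORT A =====
-- termination helper for both DFS loops: total weight of entries whose key is not yet marked
def pvW (graph : List (String × List String)) (p : String → Bool) : Nat :=
  (graph.map (fun e => if p e.1 then 0 else e.2.length + 1)).sum

-- termination helper: marking more keys never increases the weight (cited in decreasing_by)
lemma pvW_cons (k : String) (ms : List String) (t : List (String × List String)) (p : String → Bool) :
    pvW ((k, ms) :: t) p = (if p k then 0 else ms.length + 1) + pvW t p := by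
  simp [pvW]

-- termination helper: marking more keys never increases the weight (cited in decreasing_by)
lemma pvW_mono (graph : List (String × List String)) (p q : String → Bool)
    (hmono : ∀ x, p x = true → q x = true) : pvW graph q ≤ pvW graph p := by
  induction graph with
  | nil => simp [pvW]
  | cons e t ih =>
    obtain ⟨k, ms⟩ := e
    rw [pvW_cons, pvW_cons]
    cases hp : p k with
    | true => simp [hmono k hp]; omega
    | false => cases hq : q k <;> simp <;> omega

-- termination helper: newly marking key v removes at least its first entry's weight (cited in decreasing_by)
lemma pvW_key (graph : List (String × List String)) (p q : String → Bool) (v : String)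
    (ns : List String) (hv : p v = false) (hqv : q v = true)
    (hmono : ∀ x, p x = true → q x = true)
    (hget : (PySem.Dict.mk graph).get? v = some ns) :
    pvW graph q + ns.length + 1 ≤ pvW graph p := by
  induction graph with
  | nil => simp [PySem.Dict.get?] at hget
  | cons e t ih =>
    obtain ⟨k, ms⟩ := e
    rw [PySem.Dict.get?_mk_cons] at hget
    rw [pvW_cons, pvW_cons]
    have hmt := pvW_mono t p q hmono
    by_cases hk : (k == v) = true
    · simp only [if_pos hk] at hget
      obtain rfl : ms = ns := by simpa using hget
      obtain rfl : k = v := by simpa using hk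
      simp only [hv, hqv, if_true, if_false, Bool.false_eq_true]
      omega
    · simp only [if_neg hk] at hget
      have hrec := ih hget
      cases hp : p k with
      | true => simp [hmono k hp]; omega
      | false => cases hq : q k <;> simp <;> omega

-- Set-membership after add (helper for termination and the invariant)
lemma pvSet_contains_add (s : PySem.Set String) (x v : String) :
    PySem.Set.contains (PySem.Set.add s v) x = (x == v || PySem.Set.contains s x) := by
  simp only [PySem.Set.add, PySem.Set.contains]
  split <;> rename_i h
  · cases hx : (x == v) with
    | false => simp
    | true => simp_all
  · simp [List.contains_eq_mem]
    cases hx : (x == v) with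
    | false => simp_all
    | true => simp_all

-- A's while-loop over the explicit stack (top of stack = head of the list)
def dfsLoop (graph : List (String × List String)) :
    List (String × Int) → PySem.Set String → Int → Int
  | [], _, countall => countall
  | (v, count) :: stack, discovered, countall =>
    let countall := countall + count
    if hd : PySem.Set.contains discovered v = true then
      dfsLoop graph stack discovered countall
    else
      match hg : (PySem.Dict.mk graph).get? v with
      | some ns =>
          dfsLoop graph (ns.reverse.map (fun w => (w, count + 1)) ++ stack)
            (PySem.Set.add discovered v) countall
      | none => dfsLoop graph stack (PySem.Set.add discovered v) countall
termination_by stack discovered _ => 2 * pvW graph (PySem.Set.contains discovered) + stack.length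
decreasing_by
  · simp only [List.length_cons]; omega
  · have hmono : ∀ x, PySem.Set.contains discovered x = true →
        PySem.Set.contains (PySem.Set.add discovered v) x = true := by
      intro x hx; rw [pvSet_contains_add, hx]; simp
    have hqv : PySem.Set.contains (PySem.Set.add discovered v) v = true := by
      rw [pvSet_contains_add]; simp
    have hkey := pvW_key graph (PySem.Set.contains discovered)
      (PySem.Set.contains (PySem.Set.add discovered v)) v ns
      (by simpa using hd) hqv hmono hg
    simp only [List.length_append, List.length_map, List.length_reverse, List.length_cons]
    omega
  · have hmono : ∀ x, PySem.Set.contains discovered x = true →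
        PySem.Set.contains (PySem.Set.add discovered v) x = true := by
      intro x hx; rw [pvSet_contains_add, hx]; simp
    have := pvW_mono graph (PySem.Set.contains discovered)
      (PySem.Set.contains (PySem.Set.add discovered v)) hmono
    simp; omega

def dfs (graph : List (String × List String)) (v : String) : Int :=
  dfsLoop graph [(v, 0)] PySem.Set.empty 0

-- ===== PORT B =====
-- one item's contribution to B's final comprehension sum: len(graph[u]) * (depth[u]+1) if u in graph
def pvContrib (graph : List (String × List String)) (p : String × Int) : Int :=
  match (PySem.Dict.mk graph).get? p.1 with
  | some ns => (ns.length : Int) * (p.2 + 1)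
  | none => 0

-- B's while-loop: build the discovery-depth dict (same stack discipline, no accumulation)
def dfsDepths (graph : List (String × List String)) :
    List (String × Int) → PySem.Dict String Int → PySem.Dict String Int
  | [], depth => depth
  | (u, d) :: stack, depth =>
    if hd : PySem.Dict.contains depth u = true then
      dfsDepths graph stack depth
    else
      match hg : (PySem.Dict.mk graph).get? u with
      | some ns =>
          dfsDepths graph (ns.reverse.map (fun w => (w, d + 1)) ++ stack) (depth.insert u d)
      | none => dfsDepths graph stack (depth.insert u d)
termination_by stack depth => 2 * pvW graph (PySem.Dict.contains depth) + stack.length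
decreasing_by
  · simp only [List.length_cons]; omega
  · have hmono : ∀ x, PySem.Dict.contains depth x = true →
        PySem.Dict.contains (depth.insert u d) x = true := by
      intro x hx; rw [PySem.Dict.contains_insert, hx]; simp
    have hqv : PySem.Dict.contains (depth.insert u d) u = true := by
      rw [PySem.Dict.contains_insert]; simp
    have hkey := pvW_key graph (PySem.Dict.contains depth)
      (PySem.Dict.contains (depth.insert u d)) u ns (by simpa using hd) hqv hmono hg
    simp only [List.length_append, List.length_map, List.length_reverse, List.length_cons]
    omega
  · have hmono : ∀ x, PySem.Dict.contains depth x = true →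
        PySem.Dict.contains (depth.insert u d) x = true := by
      intro x hx; rw [PySem.Dict.contains_insert, hx]; simp
    have := pvW_mono graph (PySem.Dict.contains depth)
      (PySem.Dict.contains (depth.insert u d)) hmono
    simp; omega

def dfs_alt (graph : List (String × List String)) (v : String) : Int :=
  ((dfsDepths graph [(v, 0)] PySem.Dict.empty).items.map (pvContrib graph)).sum

-- ===== PRECONDITION & SPEC =====
def Spec_dfs (graph : List (String × List String)) (v : String) (out : Int) : Prop := out = dfs_alt graph v
instance (graph : List (String × List String)) (v : String) (out : Int) : Decidable (Spec_dfs graph v out) := by unfold Spec_dfs; infer_instance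

-- ===== CLAIM (what is proved, stated in full; the proofs are below) =====
def Claim_equal_dfs : Prop := ∀ (graph : List (String × List String)) (v : String), Dom_dfs graph v → Spec_dfs graph v (dfs graph v)

-- ===== LEMMAS AND PROOFS =====

-- Main invariant: A's loop returns (current total) + (counts still pending on the stack)
-- + (the contributions of everything the depth dict will still discover).
lemma pv_main (graph : List (String × List String)) :
    ∀ (n : Nat) (stack : List (String × Int)) (disc : PySem.Set String)
      (depth : PySem.Dict String Int) (countall : Int),
      2 * pvW graph (PySem.Set.contains disc) + stack.length ≤ n →
      (∀ x, PySem.Set.contains disc x = PySem.Dict.contains depth x) →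
      dfsLoop graph stack disc countall =
        countall + (stack.map (fun p => p.2)).sum
          + ((dfsDepths graph stack depth).items.map (pvContrib graph)).sum
          - (depth.items.map (pvContrib graph)).sum := by
  intro n
  induction n using Nat.strong_induction_on with
  | _ n ih =>
    intro stack disc depth countall hbound hinv
    match stack with
    | [] =>
      rw [dfsLoop, dfsDepths]
      simp
    | (u, c) :: stack =>
      rw [dfsLoop, dfsDepths]
      by_cases hd : PySem.Set.contains disc u = true
      · have hd' : PySem.Dict.contains depth u = true := (hinv u) ▸ hd
        simp only [hd, hd', dite_true]
        simp only [List.length_cons] at hbound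
        rw [ih (n - 1) (by omega) stack disc depth (countall + c) (by omega) hinv]
        simp only [List.map_cons, List.sum_cons]
        ring
      · have hd' : ¬ PySem.Dict.contains depth u = true := (hinv u) ▸ hd
        simp only [hd, hd']
        have hmono : ∀ x, PySem.Set.contains disc x = true →
            PySem.Set.contains (PySem.Set.add disc u) x = true := by
          intro x hx; rw [pvSet_contains_add, hx]; simp
        have hinv' : ∀ x, PySem.Set.contains (PySem.Set.add disc u) x =
            PySem.Dict.contains (depth.insert u c) x := by
          intro x; rw [pvSet_contains_add, PySem.Dict.contains_insert, hinv]
        have hitems : (depth.insert u c).items = depth.items ++ [(u, c)] :=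
          PySem.Dict.items_insert_of_not_contains depth c (by simpa using hd')
        match hg : (PySem.Dict.mk graph).get? u with
        | some ns =>
          have hqv : PySem.Set.contains (PySem.Set.add disc u) u = true := by
            rw [pvSet_contains_add]; simp
          have hkey := pvW_key graph (PySem.Set.contains disc)
            (PySem.Set.contains (PySem.Set.add disc u)) u ns
            (by simpa using hd) hqv hmono hg
          simp only [List.length_cons] at hbound
          simp only [Bool.false_eq_true, dite_false]
          rw [ih (n - 1) (by omega)
            (ns.reverse.map (fun w => (w, c + 1)) ++ stack)
            (PySem.Set.add disc u) (depth.insert u c) (countall + c)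
            (by simp only [List.length_append, List.length_map, List.length_reverse]; omega)
            hinv']
          simp only [List.map_append, List.map_map, List.sum_append, List.map_cons,
            List.sum_cons, hitems]
          have hconst : (List.map ((fun p : String × Int => p.2) ∘ fun w => (w, c + 1)) ns.reverse).sum
              = (ns.length : Int) * (c + 1) := by
            rw [show ((fun p : String × Int => p.2) ∘ fun w => (w, c + 1)) = fun _ => c + 1 from rfl]
            rw [PySem.List.sum_map_const_int]
            simp
          have hcontrib : pvContrib graph (u, c) = (ns.length : Int) * (c + 1) := by
            simp [pvContrib, hg]
          rw [hconst]
          simp [hcontrib]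
          ring
        | none =>
          have := pvW_mono graph (PySem.Set.contains disc)
            (PySem.Set.contains (PySem.Set.add disc u)) hmono
          simp only [List.length_cons] at hbound
          simp only [Bool.false_eq_true, dite_false]
          rw [ih (n - 1) (by omega) stack (PySem.Set.add disc u) (depth.insert u c)
            (countall + c) (by omega) hinv']
          have hcontrib : pvContrib graph (u, c) = 0 := by simp [pvContrib, hg]
          simp only [List.map_cons, List.sum_cons, hitems, List.map_append, List.sum_append]
          simp [hcontrib]
          ring

-- ===== VERDICT (by name: the statement is the Claim_ definition above) =====
theorem dfs_spec : Claim_equal_dfs := by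
  intro graph v _
  unfold Spec_dfs dfs dfs_alt
  rw [pv_main graph (2 * pvW graph (PySem.Set.contains PySem.Set.empty) + 1)
    [(v, 0)] PySem.Set.empty PySem.Dict.empty 0 (by simp) (fun x => rfl)]
  simp [PySem.Dict.empty]
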